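-- pv_equiv track=rewrite | github.com/furaoing/waffle | waffle/math/combinations.py | helper
-- ===== SOURCE A (Python) =====
-- def expand_element(x, y, depth):
--     code = []
--     ax = x[depth]
--     for i in ax:
--         code.append(y + [i])
--     return code
--
-- def expand_group(x, y, depth):
--     code = []
--     for a_list in y:
--         code = code + expand_element(x, a_list, depth)
--     return code
--
-- def helper(depth, bank):
--     if depth == 0:
--         tmp = bank[depth]
--         ax = []
--         for x in tmp:
--             ax.append([x])
--         return ax
--     else:
--         expanded = helper(depth-1, bank)
--         return expand_group(bank, expanded, depth)
-- ===== SOURCE B (Python) =====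
-- def helper(depth, bank):
--     result = [[x] for x in bank[0]]
--     for d in range(1, depth + 1):
--         if not result:
--             return []
--         result = [row + [i] for row in result for i in bank[d]]
--     return result
-- ===== Notes on version B (the rewrite author's own statement) =====
-- stated objective: simpler
-- what changed: Replaces A's depth-recursion with the expand_group/expand_element helpers by a single iterative loop over the bank levels that rebuilds the product row list level by level (with an empty-result short-circuit).
import Mathlib
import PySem

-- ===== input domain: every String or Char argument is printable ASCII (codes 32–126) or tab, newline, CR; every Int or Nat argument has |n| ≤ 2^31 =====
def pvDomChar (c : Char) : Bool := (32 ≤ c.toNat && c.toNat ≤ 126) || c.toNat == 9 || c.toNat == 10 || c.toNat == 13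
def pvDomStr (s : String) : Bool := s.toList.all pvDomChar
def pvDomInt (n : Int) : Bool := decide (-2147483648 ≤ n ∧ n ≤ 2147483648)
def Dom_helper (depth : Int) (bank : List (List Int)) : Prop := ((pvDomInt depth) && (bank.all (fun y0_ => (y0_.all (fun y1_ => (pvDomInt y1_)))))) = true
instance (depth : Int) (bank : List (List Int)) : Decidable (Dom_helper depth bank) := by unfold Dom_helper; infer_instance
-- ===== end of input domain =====

-- B builds the product with one iterative loop over bank levels (with an empty-result short-circuit)
-- instead of A's depth-recursion with the expand_group/expand_element helpers; same return values on Pre_.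


-- ===== PORT A =====
-- expand_element(x, y, depth): appends y + [i] for each i in x[depth]
def expandElement (x : List (List Int)) (y : List Int) (depth : Int) : List (List Int) :=
  (PySem.List.pyGetD x depth []).foldl (fun code i => code ++ [y ++ [i]]) []

-- expand_group(x, y, depth)
def expandGroup (x : List (List Int)) (y : List (List Int)) (depth : Int) : List (List Int) :=
  y.foldl (fun code aList => code ++ expandElement x aList depth) []

-- A's recursion on depth, run on depth.toNat (Python diverges for depth < 0: outside Pre_)
def helperGo (bank : List (List Int)) : Nat → List (List Int)
  | 0 => (PySem.List.pyGetD bank 0 []).foldl (fun ax x => ax ++ [[x]]) []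
  | n + 1 => expandGroup bank (helperGo bank n) ((n : Int) + 1)

def helper (depth : Int) (bank : List (List Int)) : List (List Int) :=
  helperGo bank depth.toNat

-- ===== PORT B =====
-- one level of the product: [row + [i] for row in res for i in bank[d]]
def altStep (bank : List (List Int)) (d : Int) (res : List (List Int)) : List (List Int) :=
  res.flatMap (fun row => (PySem.List.pyGetD bank d []).map (fun i => row ++ [i]))

-- the for-loop 'for d in range(1, depth+1)' with the early 'return []'
-- (d counts up to stop = depth+1, matching Python's lazy range)
def altLoop (bank : List (List Int)) (res : List (List Int)) (d stop : Int) : List (List Int) :=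
  if stop ≤ d then res
  else if res = [] then [] else altLoop bank (altStep bank d res) (d + 1) stop
termination_by (stop - d).toNat
decreasing_by omega

def helper_alt (depth : Int) (bank : List (List Int)) : List (List Int) :=
  altLoop bank ((PySem.List.pyGetD bank 0 []).map (fun x => [x])) 1 (depth + 1)

-- ===== PRECONDITION & SPEC =====
-- Pre_ excludes exactly the inputs where the Python A raises: negative depth (unbounded recursion),
-- empty bank (bank[0] IndexError), and depth ≥ len(bank) with every level nonempty (bank[depth] IndexError).
def Pre_helper (depth : Int) (bank : List (List Int)) : Prop :=
  0 ≤ depth ∧ bank ≠ [] ∧ (depth < bank.length ∨ [] ∈ bank)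
instance (depth : Int) (bank : List (List Int)) : Decidable (Pre_helper depth bank) := by
  unfold Pre_helper; infer_instance

def pvWitness_helper : Int × List (List Int) := (1, [[1, 2], [3]])

def Spec_helper (depth : Int) (bank : List (List Int)) (out : List (List Int)) : Prop := out = helper_alt depth bank
instance (depth : Int) (bank : List (List Int)) (out : List (List Int)) : Decidable (Spec_helper depth bank out) := by unfold Spec_helper; infer_instance

-- ===== CLAIM (what is proved, stated in full; the proofs are below) =====
def Claim_equal_helper : Prop := ∀ (depth : Int) (bank : List (List Int)), Dom_helper depth bank → Pre_helper depth bank → Spec_helper depth bank (helper depth bank)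

-- ===== LEMMAS AND PROOFS =====

-- proof-side list form of B's loop
def altLoopL (bank : List (List Int)) (res : List (List Int)) : List Int → List (List Int)
  | [] => res
  | d :: ds => if res = [] then [] else altLoopL bank (altStep bank d res) ds

theorem altLoop_eq_altLoopL (bank : List (List Int)) (res : List (List Int)) (d stop : Int) :
    altLoop bank res d stop = altLoopL bank res (PySem.List.pyRange d stop 1) := by
  rw [altLoop.eq_def]
  by_cases h : stop ≤ d
  · rw [if_pos h, PySem.List.pyRange_one_eq_nil h, altLoopL]
  · rw [if_neg h, PySem.List.pyRange_one_cons (by omega), altLoopL]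
    by_cases hres : res = []
    · simp [hres]
    · rw [if_neg hres, if_neg hres]
      exact altLoop_eq_altLoopL bank (altStep bank d res) (d + 1) stop
termination_by (stop - d).toNat
decreasing_by omega

-- expand_element is one map
theorem expandElement_eq_map (x : List (List Int)) (y : List Int) (d : Int) :
    expandElement x y d = (PySem.List.pyGetD x d []).map (fun i => y ++ [i]) := by
  simp [expandElement, ← List.flatMap_def,
    ← List.map_eq_flatMap]

-- expand_group equals one product step of B
theorem expandGroup_eq_step (bank : List (List Int)) (y : List (List Int)) (d : Int) :
    expandGroup bank y d = altStep bank d y := by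
  simp [expandGroup, altStep, expandElement_eq_map,
    ← List.flatMap_def]

-- peeling the last level off B's loop; the early return is absorbed since altStep _ _ [] = []
theorem altLoopL_append_singleton (bank : List (List Int)) (res : List (List Int))
    (ds : List Int) (d : Int) :
    altLoopL bank res (ds ++ [d]) = altStep bank d (altLoopL bank res ds) := by
  induction ds generalizing res with
  | nil =>
    by_cases h : res = [] <;> simp [altLoopL, altStep, h]
  | cons d' ds ih =>
    by_cases h : res = []
    · simp [altLoopL, altStep, h]
    · simp [altLoopL, h, ih]

theorem helperGo_eq_alt (bank : List (List Int)) (n : Nat) :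
    helperGo bank n =
      altLoopL bank ((PySem.List.pyGetD bank 0 []).map (fun x => [x]))
        (PySem.List.pyRange 1 ((n : Int) + 1) 1) := by
  induction n with
  | zero =>
    rw [PySem.List.pyRange_one_eq_nil (by norm_num)]
    simp [helperGo, altLoopL, ← List.flatMap_def,
      ← List.map_eq_flatMap]
  | succ n ih =>
    have hr : PySem.List.pyRange 1 ((n : Int) + 1 + 1) 1
        = PySem.List.pyRange 1 ((n : Int) + 1) 1 ++ [(n : Int) + 1] :=
      PySem.List.pyRange_one_succ_right (by omega)
    rw [show ((n + 1 : Nat) : Int) + 1 = ((n : Int) + 1) + 1 by push_cast; ring, hr,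
      altLoopL_append_singleton]
    simp [helperGo, expandGroup_eq_step, ih]

theorem helper_eq_alt (depth : Int) (bank : List (List Int)) (h : 0 ≤ depth) :
    helper depth bank = helper_alt depth bank := by
  have hd : ((depth.toNat : Nat) : Int) = depth := Int.toNat_of_nonneg h
  rw [helper, helper_alt, altLoop_eq_altLoopL, helperGo_eq_alt, hd]

-- ===== VERDICT (by name: the statement is the Claim_ definition above) =====
theorem helper_spec : Claim_equal_helper := by
  intro depth bank _ hpre
  exact helper_eq_alt depth bank hpre.1
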